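-- pv_equiv track=rewrite | github.com/sean-workman/bioalgs | chapter3/reconstruction_from_read_pairs.py | graph_from_gapped_patterns
-- ===== SOURCE A (Python) =====
-- def graph_from_gapped_patterns(k, d, gapped_patterns):
--     enumerate_dict = {pattern:[] for pattern in gapped_patterns}
--     for pattern in gapped_patterns:
--         enumerate_dict[pattern].append('|'.join([pattern[1:1+k-1], pattern[k+2:k+2+k-1]]))
--         enumerate_dict[pattern].append('|'.join([pattern[:k-1], pattern[k+1:k+1+k-1]]))
--     graph = {}
--     for s_pair,s_fixes in enumerate_dict.items():
--         graph[s_pair] = []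
--         for q_pair,q_fixes in enumerate_dict.items():
--             if s_fixes[0] == q_fixes[1]:
--                 graph[s_pair].append(q_pair)
--                 break
--     return graph
-- ===== SOURCE B (Python) =====
-- def graph_from_gapped_patterns(k, d, gapped_patterns):
--     def suffix_fix(p):
--         return p[1:k] + '|' + p[k+2:2*k+1]
--
--     def prefix_fix(p):
--         return p[:k-1] + '|' + p[k+1:2*k]
--
--     distinct = list(dict.fromkeys(gapped_patterns))
--     first_by_prefix = {}
--     for p in distinct:
--         pf = prefix_fix(p)
--         if pf not in first_by_prefix:
--             first_by_prefix[pf] = p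
--     graph = {}
--     for p in distinct:
--         sf = suffix_fix(p)
--         graph[p] = [first_by_prefix[sf]] if sf in first_by_prefix else []
--     return graph
-- ===== Notes on version B (the rewrite author's own statement) =====
-- stated objective: faster
-- what changed: B replaces A's quadratic per-pattern linear scan for a pattern whose prefix-fix matches the suffix-fix by a dictionary from prefix-fix to the first pattern carrying it, built once and looked up in O(1) per pattern.
import Mathlib
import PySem

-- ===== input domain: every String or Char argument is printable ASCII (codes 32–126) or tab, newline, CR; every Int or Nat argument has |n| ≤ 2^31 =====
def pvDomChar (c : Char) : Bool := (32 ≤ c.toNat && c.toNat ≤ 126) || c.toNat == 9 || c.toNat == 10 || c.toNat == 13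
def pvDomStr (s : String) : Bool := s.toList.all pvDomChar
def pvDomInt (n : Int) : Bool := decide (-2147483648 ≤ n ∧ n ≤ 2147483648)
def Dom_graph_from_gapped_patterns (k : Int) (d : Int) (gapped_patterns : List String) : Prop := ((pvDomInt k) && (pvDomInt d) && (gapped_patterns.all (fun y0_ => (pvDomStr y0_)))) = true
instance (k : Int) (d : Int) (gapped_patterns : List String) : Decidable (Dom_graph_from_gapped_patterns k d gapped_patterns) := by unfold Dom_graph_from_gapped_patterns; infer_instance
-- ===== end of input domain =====

-- B replaces A's quadratic scan (for every pattern, a linear search through all patterns for one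
-- whose prefix-fix equals its suffix-fix) by a dictionary from prefix-fix to the first pattern
-- carrying it, built once, giving one O(1) lookup per pattern.

-- ===== PORT A =====
-- '|'.join([pattern[1:1+k-1], pattern[k+2:k+2+k-1]])
def pvSufFixA (k : Int) (p : String) : String :=
  String.mk (PySem.List.slice p.toList (some 1) (some (1 + k - 1)) ++
    '|' :: PySem.List.slice p.toList (some (k + 2)) (some (k + 2 + k - 1)))

-- '|'.join([pattern[:k-1], pattern[k+1:k+1+k-1]])
def pvPreFixA (k : Int) (p : String) : String :=
  String.mk (PySem.List.slice p.toList none (some (k - 1)) ++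
    '|' :: PySem.List.slice p.toList (some (k + 1)) (some (k + 1 + k - 1)))

-- literal port of A: the comprehension {pattern: [] …}, the append loop, then the quadratic
-- graph loop whose inner scan stops at the first match ('break' = List.find?).  Python's
-- s_fixes[0] / q_fixes[1] never raise here (every value list has ≥ 2 entries), so the
-- comparison is ported exactly as equality of the two pyGet? options.
def graph_from_gapped_patterns (k : Int) (d : Int) (gapped_patterns : List String) :
    List (String × List String) :=
  let enum0 : PySem.Dict String (List String) :=
    gapped_patterns.foldl (fun dd p => dd.insert p []) PySem.Dict.empty
  let enumD : PySem.Dict String (List String) :=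
    gapped_patterns.foldl (fun dd p =>
      (dd.modify p [] (· ++ [pvSufFixA k p])).modify p [] (· ++ [pvPreFixA k p])) enum0
  let graph : PySem.Dict String (List String) :=
    enumD.items.foldl (fun g sp =>
      let g1 := g.insert sp.1 []
      match enumD.items.find? (fun qp => PySem.List.pyGet? sp.2 0 == PySem.List.pyGet? qp.2 1) with
      | some qp => g1.insert sp.1 (g1.getD sp.1 [] ++ [qp.1])
      | none => g1) PySem.Dict.empty
  graph.items

-- ===== PORT B =====
-- p[1:k] + '|' + p[k+2:2*k+1]
def pvSufFixB (k : Int) (p : String) : String :=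
  String.mk (PySem.List.slice p.toList (some 1) (some k) ++
    '|' :: PySem.List.slice p.toList (some (k + 2)) (some (2 * k + 1)))

-- p[:k-1] + '|' + p[k+1:2*k]
def pvPreFixB (k : Int) (p : String) : String :=
  String.mk (PySem.List.slice p.toList none (some (k - 1)) ++
    '|' :: PySem.List.slice p.toList (some (k + 1)) (some (2 * k)))

-- literal port of B: dict.fromkeys dedup, the first-by-prefix index, then the comprehension
-- (its keys 'distinct' are already unique, so the resulting dict's items are this map).
def graph_from_gapped_patterns_alt (k : Int) (d : Int) (gapped_patterns : List String) :
    List (String × List String) :=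
  let distinct := PySem.List.dedup gapped_patterns
  let firstByPrefix : PySem.Dict String String :=
    distinct.foldl (fun m p =>
      if m.contains (pvPreFixB k p) then m else m.insert (pvPreFixB k p) p) PySem.Dict.empty
  distinct.map (fun p =>
    (p, match firstByPrefix.get? (pvSufFixB k p) with
        | some q => [q]
        | none => []))

-- ===== PRECONDITION & SPEC =====
def Spec_graph_from_gapped_patterns (k : Int) (d : Int) (gapped_patterns : List String) (out : List (String × List String)) : Prop := out = graph_from_gapped_patterns_alt k d gapped_patterns
instance (k : Int) (d : Int) (gapped_patterns : List String) (out : List (String × List String)) : Decidable (Spec_graph_from_gapped_patterns k d gapped_patterns out) := by unfold Spec_graph_from_gapped_patterns; infer_instance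

-- ===== CLAIM (what is proved, stated in full; the proofs are below) =====
def Claim_equal_graph_from_gapped_patterns : Prop := ∀ (k : Int) (d : Int) (gapped_patterns : List String), Dom_graph_from_gapped_patterns k d gapped_patterns → Spec_graph_from_gapped_patterns k d gapped_patterns (graph_from_gapped_patterns k d gapped_patterns)

-- ===== LEMMAS AND PROOFS =====

-- the two ports' fix strings agree (the slice bounds are the same integers)
theorem sufFix_eq (k : Int) (p : String) : pvSufFixA k p = pvSufFixB k p := by
  unfold pvSufFixA pvSufFixB
  have h1 : 1 + k - 1 = k := by ring
  have h2 : k + 2 + k - 1 = 2 * k + 1 := by ring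
  rw [h1, h2]

theorem preFix_eq (k : Int) (p : String) : pvPreFixA k p = pvPreFixB k p := by
  unfold pvPreFixA pvPreFixB
  have h : k + 1 + k - 1 = 2 * k := by ring
  rw [h]

theorem find?_congr_mem {α : Type} {l : List α} {p q : α → Bool} (h : ∀ x ∈ l, p x = q x) :
    l.find? p = l.find? q := by
  induction l with
  | nil => rfl
  | cons a t ih =>
    simp only [List.find?_cons]
    rw [h a (by simp)]
    cases q a <;> simp [ih (fun x hx => h x (by simp [hx]))]

-- every value of the comprehension dict {p: [] for p in l} is []
theorem phase1_getD (l : List String) (dd : PySem.Dict String (List String))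
    (h : ∀ c, dd.getD c [] = []) (c : String) :
    (l.foldl (fun dd p => dd.insert p ([] : List String)) dd).getD c [] = [] := by
  induction l generalizing dd with
  | nil => exact h c
  | cons x t ih =>
    simp only [List.foldl_cons]
    exact ih _ (fun c' => by rw [PySem.Dict.getD_insert]; split <;> simp [h])

-- the double-append loop is a single-append loop over the flattened (key, value) pairs
theorem phase2_flat (k : Int) (l : List String) (dd : PySem.Dict String (List String)) :
    l.foldl (fun dd p =>
      (dd.modify p [] (· ++ [pvSufFixA k p])).modify p [] (· ++ [pvPreFixA k p])) dd =
    (l.flatMap (fun p => [(p, pvSufFixA k p), (p, pvPreFixA k p)])).foldl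
      (fun dd q => dd.modify q.1 [] (· ++ [q.2])) dd := by
  induction l generalizing dd with
  | nil => rfl
  | cons x t ih => simp [List.flatMap_cons, ih]

-- first-match lookup: the guarded-insert loop indexes the FIRST element with each prefix-fix
theorem firstByPrefix_get? (k : Int) (l : List String) (m : PySem.Dict String String)
    (key : String) :
    (l.foldl (fun m p =>
        if m.contains (pvPreFixB k p) then m else m.insert (pvPreFixB k p) p) m).get? key =
    ((m.get? key).or (l.find? (fun q => pvPreFixB k q == key))) := by
  induction l generalizing m with
  | nil => cases h : m.get? key <;> simp [h]
  | cons x t ih =>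
    simp only [List.foldl_cons, List.find?_cons]
    by_cases hx : pvPreFixB k x == key
    · have hxe : pvPreFixB k x = key := by simpa using hx
      by_cases hc : m.contains (pvPreFixB k x)
      · rw [if_pos hc, ih]
        have : (m.get? key).isSome := by
          rw [← hxe]
          rw [PySem.Dict.contains_eq_isSome_get?] at hc
          exact hc
        obtain ⟨v, hv⟩ := Option.isSome_iff_exists.mp this
        simp [hv, hx]
      · rw [if_neg hc, ih]
        have : (m.insert (pvPreFixB k x) x).get? key = some x := by
          rw [← hxe]; exact PySem.Dict.get?_insert_self m (pvPreFixB k x) x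
        have hm : m.get? key = none := by
          rw [← hxe]
          rw [PySem.Dict.contains_eq_isSome_get?] at hc
          simpa using hc
        simp [this, hm, hx]
    · have hxf : (pvPreFixB k x == key) = false := by simpa using hx
      have hne : key ≠ pvPreFixB k x := by
        intro h; rw [h] at hxf; simp at hxf
      rw [hxf]
      by_cases hc : m.contains (pvPreFixB k x)
      · rw [if_pos hc, ih]
      · rw [if_neg hc, ih, PySem.Dict.get?_insert_of_ne (hne := hne)]

-- pyGet? 0 / pyGet? 1 on a list with at least two elements
theorem pyGet?_two_zero {α : Type} (x y : α) (t : List α) :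
    PySem.List.pyGet? (x :: y :: t) 0 = some x := by
  have : ((0:Int) ≤ (t.length:Int) + 1) := by positivity
  simp [PySem.List.pyGet?, PySem.List.pyIdx?, this]

theorem pyGet?_two_one {α : Type} (x y : α) (t : List α) :
    PySem.List.pyGet? (x :: y :: t) 1 = some y := by
  simp [PySem.List.pyGet?, PySem.List.pyIdx?]

-- proof-only abbreviations for A's two dict-building phases
def pvEnum0 (gp : List String) : PySem.Dict String (List String) :=
  gp.foldl (fun dd p => dd.insert p []) PySem.Dict.empty

def pvEnumD (k : Int) (gp : List String) : PySem.Dict String (List String) :=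
  gp.foldl (fun dd p =>
    (dd.modify p [] (· ++ [pvSufFixA k p])).modify p [] (· ++ [pvPreFixA k p])) (pvEnum0 gp)

-- the flattened (key, appended value) pairs of A's append loop
def pvL (k : Int) (gp : List String) : List (String × String) :=
  gp.flatMap (fun p => [(p, pvSufFixA k p), (p, pvPreFixA k p)])

theorem pvL_map_fst_mem (k : Int) (gp : List String) (y : String)
    (h : y ∈ (pvL k gp).map (·.1)) : y ∈ gp := by
  simp only [pvL, List.map_flatMap, List.mem_flatMap] at h
  obtain ⟨p, hp, hy⟩ := h
  simp at hy
  exact hy ▸ hp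

-- values of the flattened append loop, grouped per key
theorem pvL_filter_map (k : Int) (gp : List String) (c : String) :
    ((pvL k gp).filter (fun q => q.1 == c)).map (·.2) =
    (gp.filter (fun p => p == c)).flatMap (fun p => [pvSufFixA k p, pvPreFixA k p]) := by
  induction gp with
  | nil => rfl
  | cons x t ih =>
    simp only [pvL, List.flatMap_cons] at *
    by_cases hx : x = c
    · subst hx; simp [ih]
    · have : (x == c) = false := by simp [hx]
      simp [this, ih]

theorem enum0_getD (gp : List String) (c : String) : (pvEnum0 gp).getD c [] = [] :=
  phase1_getD gp PySem.Dict.empty (fun _ => by simp [pysem]) c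

theorem enum0_keys (gp : List String) : (pvEnum0 gp).keys = PySem.List.dedup gp := by
  unfold pvEnum0
  rw [PySem.Dict.keys_foldl_insert]
  simp [pysem]

theorem enum0_nodup (gp : List String) : (pvEnum0 gp).keys.Nodup := by
  exact PySem.Dict.nodup_keys_foldl_insert _ _ _ PySem.Dict.nodup_keys_empty

theorem enumD_flat (k : Int) (gp : List String) :
    pvEnumD k gp = (pvL k gp).foldl (fun dd q => dd.modify q.1 [] (· ++ [q.2])) (pvEnum0 gp) :=
  phase2_flat k gp (pvEnum0 gp)

theorem enumD_keys (k : Int) (gp : List String) :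
    (pvEnumD k gp).keys = PySem.List.dedup gp := by
  rw [enumD_flat, PySem.Dict.keys_foldl_modify_key (key := fun q : String × String => q.1),
    enum0_keys, PySem.Set.update_eq_append_filter]
  have : (PySem.Set.ofList ((pvL k gp).map (·.1))).filter
      (fun y => !(PySem.Set.contains (PySem.List.dedup gp) y)) = [] := by
    rw [List.filter_eq_nil_iff]
    intro y hy
    have hygp : y ∈ gp := pvL_map_fst_mem k gp y (by
      have := (PySem.Set.mem_ofList (xs := (pvL k gp).map (·.1)) (y := y)).mp hy
      exact this)
    simp [hygp]
  rw [this, List.append_nil]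

theorem enumD_nodup (k : Int) (gp : List String) : (pvEnumD k gp).keys.Nodup := by
  rw [enumD_flat]
  exact PySem.Dict.nodup_keys_foldl_modify_key _ _ _ _ _ (enum0_nodup gp)

theorem enumD_getD (k : Int) (gp : List String) (c : String) :
    (pvEnumD k gp).getD c [] =
    (gp.filter (fun p => p == c)).flatMap (fun p => [pvSufFixA k p, pvPreFixA k p]) := by
  rw [enumD_flat, PySem.Dict.getD_foldl_modify_append, enum0_getD, List.nil_append,
    pvL_filter_map]

-- for c ∈ gp the stored value list starts with [suffix-fix c, prefix-fix c, …]
theorem enumD_getD_shape (k : Int) (gp : List String) (c : String) (hc : c ∈ gp) :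
    ∃ r, (pvEnumD k gp).getD c [] = pvSufFixA k c :: pvPreFixA k c :: r := by
  rw [enumD_getD]
  have hmem : c ∈ gp.filter (fun p => p == c) := List.mem_filter.mpr ⟨hc, by simp⟩
  cases hfil : gp.filter (fun p => p == c) with
  | nil => rw [hfil] at hmem; simp at hmem
  | cons hd tl =>
    have : hd ∈ gp.filter (fun p => p == c) := by rw [hfil]; simp
    have hhd : hd = c := by simpa using (List.mem_filter.mp this).2
    subst hhd
    exact ⟨tl.flatMap (fun p => [pvSufFixA k p, pvPreFixA k p]), by simp⟩

theorem enumD_items (k : Int) (gp : List String) :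
    (pvEnumD k gp).items =
    (PySem.List.dedup gp).map (fun c => (c, (pvEnumD k gp).getD c [])) := by
  rw [PySem.Dict.items_eq_map_keys (pvEnumD k gp) (enumD_nodup k gp) [], enumD_keys]

-- A's inner scan result for one row
def pvOutA (k : Int) (gp : List String) (sp : String × List String) : List String :=
  match (pvEnumD k gp).items.find?
      (fun qp => PySem.List.pyGet? sp.2 0 == PySem.List.pyGet? qp.2 1) with
  | some qp => [qp.1]
  | none => []

-- the main pointwise fact: both ports are (dedup gp).map of the same per-pattern value
theorem main_eq (k : Int) (d : Int) (gp : List String) :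
    graph_from_gapped_patterns k d gp = graph_from_gapped_patterns_alt k d gp := by
  have hA : graph_from_gapped_patterns k d gp =
      ((pvEnumD k gp).items.foldl (fun g sp =>
        let g1 := g.insert sp.1 []
        match (pvEnumD k gp).items.find?
            (fun qp => PySem.List.pyGet? sp.2 0 == PySem.List.pyGet? qp.2 1) with
        | some qp => g1.insert sp.1 (g1.getD sp.1 [] ++ [qp.1])
        | none => g1) PySem.Dict.empty).items := rfl
  -- collapse each loop body to a single insert of the computed adjacency list
  have hstep : ∀ (g : PySem.Dict String (List String)) (sp : String × List String),
      (let g1 := g.insert sp.1 []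
       match (pvEnumD k gp).items.find?
           (fun qp => PySem.List.pyGet? sp.2 0 == PySem.List.pyGet? qp.2 1) with
       | some qp => g1.insert sp.1 (g1.getD sp.1 [] ++ [qp.1])
       | none => g1) =
      g.insert sp.1 (pvOutA k gp sp) := by
    intro g sp
    unfold pvOutA
    cases h : (pvEnumD k gp).items.find?
        (fun qp => PySem.List.pyGet? sp.2 0 == PySem.List.pyGet? qp.2 1) with
    | none => simp [h]
    | some qp => simp [PySem.Dict.getD_insert_self, PySem.Dict.insert_insert_self]
  have hfun : (fun (g : PySem.Dict String (List String)) (sp : String × List String) =>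
      let g1 := g.insert sp.1 []
      match (pvEnumD k gp).items.find?
          (fun qp => PySem.List.pyGet? sp.2 0 == PySem.List.pyGet? qp.2 1) with
      | some qp => g1.insert sp.1 (g1.getD sp.1 [] ++ [qp.1])
      | none => g1) =
      (fun g sp => g.insert sp.1 (pvOutA k gp sp)) := by
    funext g sp; exact hstep g sp
  rw [hA, hfun]
  -- the outer loop inserts each (distinct) pattern once: items append in order
  have hmapfst : ((pvEnumD k gp).items.map (·.1)) = PySem.List.dedup gp := by
    rw [enumD_items]; simp [Function.comp_def]
  have h1 : ∀ a ∈ (pvEnumD k gp).items,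
      (PySem.Dict.empty : PySem.Dict String (List String)).contains a.1 = false := by
    intro a _; simp [pysem]
  have h2 : ((pvEnumD k gp).items.map (fun sp : String × List String => sp.1)).Nodup := by
    rw [hmapfst]; exact PySem.List.nodup_dedup gp
  rw [PySem.Dict.items_foldl_insert_fresh (d := PySem.Dict.empty)
    (l := (pvEnumD k gp).items) (k := fun sp : String × List String => sp.1)
    (v := pvOutA k gp) h1 h2]
  have hempty : (PySem.Dict.empty : PySem.Dict String (List String)).items = [] := rfl
  rw [hempty, List.nil_append]
  -- B's side: the first-by-prefix dict is a first-match search over the distinct patterns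
  unfold graph_from_gapped_patterns_alt
  have hB : ∀ key, ((PySem.List.dedup gp).foldl (fun m p =>
      if m.contains (pvPreFixB k p) then m else m.insert (pvPreFixB k p) p)
      PySem.Dict.empty).get? key =
      (PySem.List.dedup gp).find? (fun q => pvPreFixB k q == key) := by
    intro key
    rw [firstByPrefix_get?]
    simp [pysem]
  simp only [hB]
  rw [enumD_items]
  rw [List.map_map]
  apply List.map_congr_left
  intro c hcD
  have hc : c ∈ gp := (PySem.List.mem_dedup gp c).mp hcD
  simp only [Function.comp]
  congr 1
  -- identify the inner linear scan with the first-match search over distinct patterns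
  simp only [pvOutA]
  rw [enumD_items, List.find?_map]
  have hpred : ∀ q ∈ PySem.List.dedup gp,
      ((fun qp : String × List String =>
          PySem.List.pyGet? ((c, (pvEnumD k gp).getD c []) : String × List String).2 0 ==
          PySem.List.pyGet? qp.2 1) ∘ (fun c => (c, (pvEnumD k gp).getD c []))) q =
      (fun q => pvPreFixB k q == pvSufFixB k c) q := by
    intro q hqD
    have hq : q ∈ gp := (PySem.List.mem_dedup gp q).mp hqD
    obtain ⟨rc, hrc⟩ := enumD_getD_shape k gp c hc
    obtain ⟨rq, hrq⟩ := enumD_getD_shape k gp q hq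
    simp only [Function.comp, hrc, hrq, pyGet?_two_zero, pyGet?_two_one]
    rw [sufFix_eq, preFix_eq]
    simp [Bool.beq_comm]
  rw [find?_congr_mem hpred]
  cases h : (PySem.List.dedup gp).find? (fun q => pvPreFixB k q == pvSufFixB k c) with
  | none => simp
  | some q => simp

-- ===== VERDICT (by name: the statement is the Claim_ definition above) =====
theorem graph_from_gapped_patterns_spec : Claim_equal_graph_from_gapped_patterns := by
  intro k d gp _
  exact main_eq k d gp
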